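-- pv_equiv track=rewrite | github.com/daniel-reich/turbo-robot | HaMCeHeJkaWvMg7LS_5.py | sun_loungers
-- ===== SOURCE A (Python) =====
-- def sun_loungers(beach):
--     if beach == "0":
--         return 1
--     beach = list(beach)
--     counter = 0
--     for i in range(0,len(beach)):
--         if i == 0:
--             if beach[i] == "0" and beach[i+1] == "0":
--                 counter += 1
--                 beach[i] = "1"
--         elif i == len(beach)-1:
--             if beach[i] == "0" and beach[i-1] != "1":
--                 counter += 1
--                 beach[i] = "1"
--         elif beach[i] == "0" and beach[i-1] == "0" and beach[i+1] == "0":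
--             counter += 1
--             beach[i] = "1"
--     return counter
-- ===== SOURCE B (Python) =====
-- def sun_loungers(beach):
--     # One pass over run lengths of free cells: a run of L zeros with o open
--     # string-boundary ends fits (L + o - 1) // 2 loungers.  `run` carries the
--     # current free-run length plus 1 virtual cell for an open left boundary.
--     total = 0
--     run = 1
--     for ch in beach:
--         if ch == "0":
--             run += 1
--         else:
--             total += max(run - 1, 0) // 2
--             run = 0
--     return total + run // 2
-- ===== Notes on version B (the rewrite author's own statement) =====
-- stated objective: simpler
-- what changed: A simulates the greedy placement cell by cell on a mutable copy with positional special cases; B makes one pass counting run lengths of free cells and adds the closed-form count max(run-1,0)//2 per run (plus a virtual cell for the open left boundary), with no mutation and no positional branches.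
-- intended difference: On beaches whose last character is '0' and whose second-to-last character is neither '0' nor '1', A's asymmetric last-position test beach[i-1] != "1" treats the foreign character as free and returns one more than B (e.g. A('20') = 1, B('20') = 0); B treats every non-'0' character as occupied, the intended reading. — e.g. on sun_loungers("20"): A returns 1, B returns 0
import Mathlib
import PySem

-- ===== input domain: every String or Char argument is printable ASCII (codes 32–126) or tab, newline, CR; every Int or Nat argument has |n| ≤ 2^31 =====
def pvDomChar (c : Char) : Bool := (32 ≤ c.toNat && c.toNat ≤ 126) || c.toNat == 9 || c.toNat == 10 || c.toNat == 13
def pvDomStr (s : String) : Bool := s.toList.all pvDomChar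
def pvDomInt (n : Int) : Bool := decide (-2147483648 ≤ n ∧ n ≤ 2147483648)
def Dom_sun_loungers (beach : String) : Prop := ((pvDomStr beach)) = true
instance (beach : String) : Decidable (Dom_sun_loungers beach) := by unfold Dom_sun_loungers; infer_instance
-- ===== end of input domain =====

-- B replaces A's cell-by-cell greedy simulation on a mutable list (with positional
-- special cases) by one pass over run lengths of free cells with a closed-form count
-- per run — simpler, no mutation.  On the D_-strings (last char '0' preceded by a
-- character that is neither '0' nor '1') A places one extra lounger; B treats every
-- non-'0' character as a wall.

-- ===== PORT A =====
-- Loop body of A's for-loop; state = (beach as char list, counter), i the loop index.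
-- `beach[i] == "0"` is ported as `pyGet? … == some '0'`: an out-of-range read gives
-- none ≠ some '0', which matches Python's short-circuit exactly (the only reachable
-- out-of-range read is beach[0+1] on a 1-char string, where Python short-circuits
-- unless the string is "0", which was returned earlier).  `beach[i] = "1"` with i in
-- range is pySetD.
def aStep (n : Int) (st : List Char × Int) (i : Int) : List Char × Int :=
  if i == 0 then
    if PySem.List.pyGet? st.1 i == some '0' && PySem.List.pyGet? st.1 (i + 1) == some '0' then
      (PySem.List.pySetD st.1 i '1', st.2 + 1)
    else st
  else if i == n - 1 then
    if PySem.List.pyGet? st.1 i == some '0' && !(PySem.List.pyGet? st.1 (i - 1) == some '1') then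
      (PySem.List.pySetD st.1 i '1', st.2 + 1)
    else st
  else
    if PySem.List.pyGet? st.1 i == some '0' && PySem.List.pyGet? st.1 (i - 1) == some '0'
        && PySem.List.pyGet? st.1 (i + 1) == some '0' then
      (PySem.List.pySetD st.1 i '1', st.2 + 1)
    else st

def sun_loungers (beach : String) : Int :=
  if beach == "0" then 1
  else
    let bs := beach.toList
    let n : Int := bs.length
    ((PySem.List.pyRange 0 n 1).foldl (aStep n) (bs, 0)).2

-- ===== PORT B =====
-- One pass: state = (total, run); `run` = current free-run length plus one virtual
-- cell for an open left boundary; a wall closes the run contributing max(run-1,0)//2.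
def sun_loungers_alt (beach : String) : Int :=
  let st := beach.toList.foldl
    (fun (st : Int × Int) ch =>
      if ch == '0' then (st.1, st.2 + 1)
      else (st.1 + PySem.Int.floordiv (max (st.2 - 1) 0) 2, 0))
    (0, 1)
  st.1 + PySem.Int.floordiv st.2 2

-- ===== PRECONDITION & SPEC =====
-- qD s: s ends in «w, '0'» where w is neither '0' nor '1' (a closed-form shape test).
def qD (s : List Char) : Bool :=
  (s.getLast? == some '0') &&
    (match s.dropLast.getLast? with
     | some w => !(w == '0') && !(w == '1')
     | none => false)

-- On beaches whose last character is '0' and whose second-to-last character is neither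
-- '0' nor '1', A's asymmetric last-position test `beach[i-1] != "1"` treats the foreign
-- character as free and places one extra lounger there (A returns B + 1), while B
-- treats every non-free character as a wall — the intended reading of "taken".
def D_sun_loungers (beach : String) : Prop := qD beach.toList = true
instance (beach : String) : Decidable (D_sun_loungers beach) := by unfold D_sun_loungers; infer_instance
def Spec_sun_loungers (beach : String) (out : Int) : Prop := ¬ D_sun_loungers beach → out = sun_loungers_alt beach
instance (beach : String) (out : Int) : Decidable (Spec_sun_loungers beach out) := by unfold Spec_sun_loungers; infer_instance
def pvDiffWitness_sun_loungers : String := "20"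
def pvDiffWitnessOut_sun_loungers : Int × Int := (1, 0)

-- ===== CLAIM (what is proved, stated in full; the proofs are below) =====
def Claim_unchanged_sun_loungers : Prop := ∀ (beach : String), Dom_sun_loungers beach → Spec_sun_loungers beach (sun_loungers beach)
def Claim_changed_sun_loungers : Prop := Dom_sun_loungers (pvDiffWitness_sun_loungers) ∧ D_sun_loungers (pvDiffWitness_sun_loungers) ∧ sun_loungers (pvDiffWitness_sun_loungers) = pvDiffWitnessOut_sun_loungers.1 ∧ sun_loungers_alt (pvDiffWitness_sun_loungers) = pvDiffWitnessOut_sun_loungers.2 ∧ pvDiffWitnessOut_sun_loungers.1 ≠ pvDiffWitnessOut_sun_loungers.2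
def Claim_exact_sun_loungers : Prop := ∀ (beach : String), Dom_sun_loungers beach → D_sun_loungers beach → sun_loungers beach ≠ sun_loungers_alt beach

-- ===== LEMMAS AND PROOFS =====

-- Abstraction of A's loop: gA ℓ t = loungers A still places on suffix t, where ℓ is
-- the (possibly mutated) character directly left of t in A's list ('0' = boundary).
def gA : Char → List Char → Int
  | _, [] => 0
  | ℓ, [c] => if c == '0' && !(ℓ == '1') then 1 else 0
  | ℓ, c :: d :: t =>
      if c == '0' && ℓ == '0' && d == '0' then 1 + gA '1' (d :: t) else gA c (d :: t)

-- Abstraction of B's loop: gB run t = what B still adds on suffix t from pending run.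
def gB : Nat → List Char → Int
  | run, [] => ((run / 2 : Nat) : Int)
  | run, c :: t =>
      if c == '0' then gB (run + 1) t else (((run - 1) / 2 : Nat) : Int) + gB 0 t

lemma fd2 (m : Nat) : PySem.Int.floordiv (m : Int) 2 = ((m / 2 : Nat) : Int) := by
  exact_mod_cast PySem.Int.floordiv_natCast m 2

lemma B_loop (t : List Char) : ∀ (total : Int) (run : Nat),
    (t.foldl
      (fun (st : Int × Int) ch =>
        if ch == '0' then (st.1, st.2 + 1)
        else (st.1 + PySem.Int.floordiv (max (st.2 - 1) 0) 2, 0))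
      (total, (run : Int))).1
    + PySem.Int.floordiv (t.foldl
      (fun (st : Int × Int) ch =>
        if ch == '0' then (st.1, st.2 + 1)
        else (st.1 + PySem.Int.floordiv (max (st.2 - 1) 0) 2, 0))
      (total, (run : Int))).2 2
    = total + gB run t := by
  induction t with
  | nil => intro total run; simp [gB]
  | cons c t ih =>
    intro total run
    by_cases hc : c = '0'
    · subst hc
      simp only [List.foldl_cons, beq_self_eq_true, if_true]
      have h1 : ((run : Int) + 1) = ((run + 1 : Nat) : Int) := by push_cast; ring
      rw [h1, ih total (run + 1)]
      simp [gB]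
    · have hcb : (c == '0') = false := by simp [hc]
      simp only [List.foldl_cons, hcb, Bool.false_eq_true, if_false]
      have hmax : max ((run : Int) - 1) 0 = ((run - 1 : Nat) : Int) := by omega
      rw [hmax, fd2]
      have h2 := ih (total + (((run - 1) / 2 : Nat) : Int)) 0
      simp only [Nat.cast_zero] at h2
      rw [h2]
      simp [gB, hcb]
      ring

lemma B_eq (beach : String) : sun_loungers_alt beach = gB 1 beach.toList := by
  unfold sun_loungers_alt
  have h := B_loop beach.toList 0 1
  simpa using h

lemma some_beq (a b : Char) : (some a == some b) = (a == b) := rfl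

lemma A_loop (t : List Char) : ∀ (pre : List Char) (counter : Int) (n : Int) (lc : Char),
    n = pre.length + t.length → pre ≠ [] → pre.getLast? = some lc →
    ((PySem.List.pyRange (pre.length : Int) n 1).foldl (aStep n) (pre ++ t, counter)).2
      = counter + gA lc t := by
  induction t with
  | nil =>
    intro pre counter n lc hn _ _
    rw [PySem.List.pyRange_one_eq_nil (by simp at hn; omega)]
    simp [gA]
  | cons c t ih =>
    intro pre counter n lc hn hpre hlc
    have hplpos : 0 < pre.length := List.length_pos_iff.mpr hpre
    have hlt : (pre.length : Int) < n := by simp at hn; omega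
    rw [PySem.List.pyRange_one_cons hlt, List.foldl_cons]
    have hi0 : ((pre.length : Int) == 0) = false := by simp; omega
    have hgetc : PySem.List.pyGet? (pre ++ c :: t) ((pre.length : Nat) : Int) = some c :=
      PySem.List.pyGet?_append_length pre t c
    have hgetp : PySem.List.pyGet? (pre ++ c :: t) (((pre.length : Nat) : Int) - 1) = some lc := by
      rw [show (((pre.length : Nat) : Int) - 1) = ((pre.length - 1 : Nat) : Int) by omega,
        PySem.List.pyGet?_natCast, List.getElem?_append_left (by omega),
        ← List.getLast?_eq_getElem?]
      exact hlc
    cases t with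
    | nil =>
      have hlast : (((pre.length : Nat) : Int) == n - 1) = true := by
        simp at hn; simp; omega
      rw [show PySem.List.pyRange (((pre.length : Nat) : Int) + 1) n 1 = []
            from PySem.List.pyRange_one_eq_nil (by simp at hn; omega), List.foldl_nil]
      simp only [aStep, hi0, hlast, Bool.false_eq_true, if_false, if_true, hgetc, hgetp,
        some_beq, gA]
      by_cases hC : ((c == '0') && !(lc == '1')) = true
      · rw [if_pos hC, if_pos hC]
      · rw [if_neg hC, if_neg hC]
        ring
    | cons d t' =>
      have hmid : (((pre.length : Nat) : Int) == n - 1) = false := by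
        simp at hn; simp; omega
      have hgetd : PySem.List.pyGet? (pre ++ c :: d :: t') (((pre.length : Nat) : Int) + 1)
          = some d := by
        rw [show (((pre.length : Nat) : Int) + 1) = ((pre.length + 1 : Nat) : Int) by omega,
          PySem.List.pyGet?_natCast, List.getElem?_append_right (by omega)]
        simp
      simp only [aStep, hi0, hmid, Bool.false_eq_true, if_false, hgetc, hgetp, hgetd]
      have hset : PySem.List.pySetD (pre ++ c :: d :: t') ((pre.length : Nat) : Int) '1'
          = (pre ++ ['1']) ++ d :: t' := by
        rw [PySem.List.pySetD_natCast]
        simp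
      have hre : pre ++ c :: d :: t' = (pre ++ [c]) ++ d :: t' := by simp
      simp only [gA, some_beq]
      by_cases hC : ((c == '0') && (lc == '0') && (d == '0')) = true
      · rw [if_pos hC, if_pos hC, hset,
          show (((pre.length : Nat) : Int) + 1) = (((pre ++ ['1']).length : Nat) : Int) from
            by simp,
          ih (pre ++ ['1']) (counter + 1) n '1' (by simp at hn ⊢; omega) (by simp)
            (List.getLast?_concat ..)]
        ring
      · rw [if_neg hC, if_neg hC, hre,
          show (((pre.length : Nat) : Int) + 1) = (((pre ++ [c]).length : Nat) : Int) from
            by simp,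
          ih (pre ++ [c]) counter n c (by simp at hn ⊢; omega) (by simp)
            (List.getLast?_concat ..)]

lemma A_eq (beach : String) : sun_loungers beach = gA '0' beach.toList := by
  unfold sun_loungers
  by_cases h0 : beach = "0"
  · subst h0
    simp only [beq_self_eq_true, if_true]
    decide
  · have hb : (beach == "0") = false := by simp [h0]
    simp only [hb, Bool.false_eq_true, if_false]
    cases hbs : beach.toList with
    | nil =>
      rw [show ((([] : List Char).length : Nat) : Int) = 0 from rfl,
        PySem.List.pyRange_one_eq_nil le_rfl]
      simp [gA]
    | cons c t =>
      cases t with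
      | nil =>
        by_cases hc : c = '0'
        · subst hc
          exact absurd (String.toList_inj.mp (by rw [hbs]; rfl)) h0
        · have hcb : (c == '0') = false := by simp [hc]
          rw [show (((([c] : List Char)).length : Nat) : Int) = 1 from rfl,
            PySem.List.pyRange_one_cons (by norm_num),
            show ((0 : Int) + 1) = 1 from by norm_num,
            PySem.List.pyRange_one_eq_nil le_rfl, List.foldl_cons, List.foldl_nil]
          simp [aStep, hcb, gA, PySem.List.pyGet?_zero_cons]
      | cons d t' =>
        have hpos : (0 : Int) < (((c :: d :: t').length : Nat) : Int) := by
          exact_mod_cast Nat.succ_pos _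
        rw [PySem.List.pyRange_one_cons hpos, List.foldl_cons]
        have g0 : PySem.List.pyGet? (c :: d :: t') (0 : Int) = some c :=
          PySem.List.pyGet?_zero_cons ..
        have g1 : PySem.List.pyGet? (c :: d :: t') ((0 : Int) + 1) = some d := by
          rw [show ((0 : Int) + 1) = ((1 : Nat) : Int) from by norm_num,
            PySem.List.pyGet?_natCast]
          rfl
        have hset0 : PySem.List.pySetD (c :: d :: t') (0 : Int) '1' = ['1'] ++ d :: t' := by
          rw [show (0 : Int) = ((0 : Nat) : Int) from rfl, PySem.List.pySetD_natCast]
          rfl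
        simp only [aStep, beq_self_eq_true, if_true, g0, g1, hset0, some_beq, gA,
          Bool.and_true]
        by_cases hC : ((c == '0') && (d == '0')) = true
        · rw [if_pos hC, if_pos hC,
            show PySem.List.pyRange ((0 : Int) + 1) (((c :: d :: t').length : Nat) : Int) 1
              = PySem.List.pyRange (((['1'] : List Char).length : Nat) : Int)
                  (((c :: d :: t').length : Nat) : Int) 1 from by norm_num,
            show ((0 : Int) + 1) = 1 from by norm_num,
            A_loop (d :: t') ['1'] 1 (((c :: d :: t').length : Nat) : Int) '1'
              (by simp; omega) (by simp) rfl]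
        · rw [if_neg hC, if_neg hC,
            show (c :: d :: t' = [c] ++ d :: t') from rfl,
            show PySem.List.pyRange ((0 : Int) + 1) ((([c] ++ d :: t').length : Nat) : Int) 1
              = PySem.List.pyRange ((([c] : List Char).length : Nat) : Int)
                  ((([c] ++ d :: t').length : Nat) : Int) 1 from by norm_num,
            A_loop (d :: t') [c] 0 ((([c] ++ d :: t').length : Nat) : Int) c
              (by simp; omega) (by simp) rfl]
          simp

def zeros (L : Nat) : List Char := List.replicate L '0'

lemma gA_skip (w : Char) (hw : (w == '0') = false) (rest : List Char) :
    ∀ ℓ : Char, gA ℓ (w :: rest) = gA w rest := by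
  intro ℓ
  cases rest with
  | nil => simp [gA, hw]
  | cons r rest' => simp [gA, hw]

lemma gA_end01 (L : Nat) : ∀ ℓ : Char, ℓ = '0' ∨ ℓ = '1' →
    gA ℓ (zeros L) = (((L + (if ℓ == '0' then 1 else 0)) / 2 : Nat) : Int) := by
  induction L with
  | zero => intro ℓ hℓ; rcases hℓ with h | h <;> subst h <;> simp [zeros, gA]
  | succ m ih =>
    intro ℓ hℓ
    cases m with
    | zero => rcases hℓ with h | h <;> subst h <;> simp [zeros, gA]
    | succ k =>
      have hz : zeros (k+1+1) = '0' :: '0' :: zeros k := by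
        simp [zeros, List.replicate_succ]
      have hz1 : ('0' : Char) :: zeros k = zeros (k+1) := by simp [zeros, List.replicate_succ]
      rw [hz]
      rcases hℓ with h | h <;> subst h
      · simp only [gA, beq_self_eq_true, Bool.and_self, if_true]
        rw [hz1, ih '1' (Or.inr rfl)]
        simp only [Char.reduceBEq, Bool.false_eq_true, if_false, if_true]
        try push_cast
        try omega
      · simp only [gA, beq_self_eq_true, Char.reduceBEq, Bool.and_false, Bool.false_and,
          Bool.and_true, Bool.true_and, Bool.false_eq_true, if_false]
        rw [hz1, ih '0' (Or.inl rfl)]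
        simp only [Char.reduceBEq, beq_self_eq_true, Bool.false_eq_true, if_false, if_true]
        try push_cast
        try omega

lemma gA_wall (w : Char) (hw : (w == '0') = false) (rest : List Char) (L : Nat) :
    ∀ ℓ : Char,
    gA ℓ (zeros L ++ w :: rest)
      = (((L + (if ℓ == '0' then 1 else 0) - 1) / 2 : Nat) : Int) + gA w rest := by
  induction L with
  | zero =>
    intro ℓ
    rw [show zeros 0 ++ w :: rest = w :: rest from by simp [zeros], gA_skip w hw rest ℓ]
    have : (((0 + (if ℓ == '0' then 1 else 0) - 1) / 2 : Nat) : Int) = 0 := by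
      split_ifs <;> simp
    rw [this]
    ring
  | succ m ih =>
    intro ℓ
    cases m with
    | zero =>
      rw [show zeros 1 ++ w :: rest = '0' :: w :: rest from by simp [zeros]]
      rw [show gA ℓ ('0' :: w :: rest)
            = if ('0' == '0' && ℓ == '0' && w == '0') = true then 1 + gA '1' (w :: rest)
              else gA '0' (w :: rest) from rfl]
      rw [if_neg (by simp [hw]), gA_skip w hw rest '0']
      have : (((1 + (if ℓ == '0' then 1 else 0) - 1) / 2 : Nat) : Int) = 0 := by
        split_ifs <;> simp
      rw [this]
      ring
    | succ k =>
      have hz : zeros (k+1+1) ++ w :: rest = '0' :: '0' :: (zeros k ++ w :: rest) := by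
        simp [zeros, List.replicate_succ]
      have hz1 : ('0' : Char) :: (zeros k ++ w :: rest) = zeros (k+1) ++ w :: rest := by
        simp [zeros, List.replicate_succ]
      rw [hz]
      by_cases hℓ : (ℓ == '0') = true
      · rw [show gA ℓ ('0' :: '0' :: (zeros k ++ w :: rest))
              = if ('0' == '0' && ℓ == '0' && '0' == '0') = true
                then 1 + gA '1' ('0' :: (zeros k ++ w :: rest))
                else gA '0' ('0' :: (zeros k ++ w :: rest)) from rfl,
          if_pos (by simp [hℓ]), hz1, ih '1']
        simp only [hℓ, Char.reduceBEq, Bool.false_eq_true, if_false, if_true]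
        try push_cast
        try omega
      · rw [show gA ℓ ('0' :: '0' :: (zeros k ++ w :: rest))
              = if ('0' == '0' && ℓ == '0' && '0' == '0') = true
                then 1 + gA '1' ('0' :: (zeros k ++ w :: rest))
                else gA '0' ('0' :: (zeros k ++ w :: rest)) from rfl,
          if_neg (by simp [hℓ]), hz1, ih '0']
        simp only [hℓ, beq_self_eq_true, Bool.false_eq_true, if_false, if_true]
        try push_cast
        try omega

lemma gB_zeros (L : Nat) : ∀ (run : Nat) (X : List Char),
    gB run (zeros L ++ X) = gB (run + L) X := by
  induction L with
  | zero => intro run X; simp [zeros]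
  | succ m ih =>
    intro run X
    have : zeros (m+1) = '0' :: zeros m := by simp [zeros, List.replicate_succ]
    rw [this]
    simp only [List.cons_append, gB, beq_self_eq_true, if_true]
    rw [ih (run+1) X]
    congr 1
    omega

lemma qD_append (xs ys : List Char) (h : 2 ≤ ys.length) : qD (xs ++ ys) = qD ys := by
  have hys : ys ≠ [] := by intro hh; subst hh; simp at h
  have hyd : ys.dropLast ≠ [] := by
    intro hh
    have := congrArg List.length hh
    simp at this
    omega
  unfold qD
  rw [List.getLast?_append_of_ne_nil xs hys, List.dropLast_append_of_ne_nil hys,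
    List.getLast?_append_of_ne_nil xs hyd]

lemma zeros_snoc (k : Nat) : zeros (k + 1) = zeros k ++ ['0'] := by
  simp [zeros, List.replicate_succ']

lemma qD_cons_zeros2 (ℓ : Char) (k : Nat) : qD (ℓ :: zeros (k + 2)) = false := by
  rw [show ℓ :: zeros (k+2) = (ℓ :: zeros k) ++ ['0', '0'] from by
    rw [show k + 2 = (k + 1) + 1 from rfl, zeros_snoc, zeros_snoc]
    simp]
  rw [qD_append _ _ (by simp)]
  rfl

lemma qD_zero_cons_zeros (L : Nat) : qD ('0' :: zeros L) = false := by
  cases L with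
  | zero => rfl
  | succ m =>
    cases m with
    | zero => rfl
    | succ k => exact qD_cons_zeros2 '0' k

-- The master correspondence: A's greedy equals B's run count plus one exactly on the
-- quirk shape qD (pending left char ℓ paired with B's pending run).
lemma bridge (n : Nat) : ∀ (t : List Char), t.length ≤ n →
    ∀ (ℓ : Char) (run : Nat), ((ℓ == '0') = true ∧ run = 1) ∨ ((ℓ == '0') = false ∧ run = 0) →
    gA ℓ t = gB run t + (if qD (ℓ :: t) then 1 else 0) := by
  induction n with
  | zero =>
    intro t ht ℓ run hcompat
    have : t = [] := List.eq_nil_of_length_eq_zero (Nat.le_zero.mp ht)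
    subst this
    rcases hcompat with ⟨h, hr⟩ | ⟨h, hr⟩ <;> subst hr <;> simp [gA, gB, qD]
  | succ n ih =>
    intro t ht ℓ run hcompat
    have htw : t.takeWhile (· == '0') = zeros (t.takeWhile (· == '0')).length := by
      apply List.eq_replicate_of_mem
      intro b hb
      simpa using List.mem_takeWhile_imp hb
    have hsplit : t = zeros (t.takeWhile (· == '0')).length ++ t.dropWhile (· == '0') := by
      conv_lhs => rw [← List.takeWhile_append_dropWhile (p := (· == '0')) (l := t)]
      rw [← htw]
    cases hd : t.dropWhile (· == '0') with
    | nil =>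
      have ht0 : t = zeros (t.takeWhile (· == '0')).length := by
        conv_lhs => rw [hsplit, hd]
        simp
      set L := (t.takeWhile (· == '0')).length with hL
      have hBz : gB run (zeros L) = (((run + L) / 2 : Nat) : Int) := by
        rw [show zeros L = zeros L ++ ([] : List Char) from by simp, gB_zeros]
        simp [gB]
      rcases hcompat with ⟨h, hr⟩ | ⟨h, hr⟩ <;> subst hr
      · have hℓ : ℓ = '0' := by simpa using h
        subst hℓ
        rw [ht0, qD_zero_cons_zeros, gA_end01 L '0' (Or.inl rfl), hBz]
        simp only [beq_self_eq_true, if_true, Bool.false_eq_true, if_false, add_zero]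
        congr 1
        omega
      · rw [ht0, hBz]
        cases hLc : L with
        | zero => simp [zeros, gA, qD]
        | succ m =>
          cases m with
          | zero =>
            rw [show zeros 1 = ['0'] from rfl]
            by_cases h1 : (ℓ == '1') = true
            · have hℓ : ℓ = '1' := by simpa using h1
              subst hℓ
              simp [gA, qD]
            · have h1' : (ℓ == '1') = false := by simpa using h1
              simp [gA, qD, h, h1']
          | succ k =>
            rw [qD_cons_zeros2 ℓ k,
              show zeros (k+1+1) = '0' :: '0' :: zeros k from by
                simp [zeros, List.replicate_succ],
              show gA ℓ ('0' :: '0' :: zeros k)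
                = if ('0' == '0' && ℓ == '0' && '0' == '0') = true
                  then 1 + gA '1' ('0' :: zeros k) else gA '0' ('0' :: zeros k) from rfl,
              if_neg (by simp [h]),
              show ('0' : Char) :: zeros k = zeros (k+1) from by
                simp [zeros, List.replicate_succ],
              gA_end01 (k+1) '0' (Or.inl rfl)]
            simp only [beq_self_eq_true, if_true, Bool.false_eq_true, if_false, add_zero]
            congr 1
            omega
    | cons w rest =>
      have hw : (w == '0') = false := by
        have := List.head?_dropWhile_not (· == '0') t
        rw [hd] at this
        simpa using this
      have ht' : t = zeros (t.takeWhile (· == '0')).length ++ w :: rest := by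
        conv_lhs => rw [hsplit, hd]
      set L := (t.takeWhile (· == '0')).length with hL
      have hlen : rest.length ≤ n := by
        have := congrArg List.length ht'
        simp [zeros] at this
        omega
      rw [ht', gA_wall w hw rest L ℓ, gB_zeros]
      rw [show gB (run + L) (w :: rest)
            = (((run + L - 1) / 2 : Nat) : Int) + gB 0 rest from by
          simp [gB, hw]]
      have hrec := ih rest hlen w 0 (Or.inr ⟨hw, rfl⟩)
      rw [hrec]
      have hq : qD (ℓ :: (zeros L ++ w :: rest)) = qD (w :: rest) := by
        cases rest with
        | nil =>
          rw [show ℓ :: (zeros L ++ [w]) = (ℓ :: zeros L) ++ [w] from by simp]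
          unfold qD
          rw [List.getLast?_concat]
          simp [hw, some_beq]
        | cons r rest' =>
          rw [show ℓ :: (zeros L ++ w :: r :: rest') = (ℓ :: zeros L) ++ w :: r :: rest'
                from by simp]
          rw [qD_append _ _ (by simp)]
      rw [hq]
      have hcnt : (((L + (if ℓ == '0' then 1 else 0) - 1) / 2 : Nat) : Int)
          = (((run + L - 1) / 2 : Nat) : Int) := by
        rcases hcompat with ⟨h, hr⟩ | ⟨h, hr⟩ <;> subst hr <;> rw [h] <;>
          simp only [if_true, if_false, Bool.false_eq_true, Bool.true_eq_false] <;>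
          (try congr 1) <;> omega
      rw [hcnt]
      ring

-- quirk shape on the extended list with the open-boundary '0' in front
lemma qD_cons_zero (t : List Char) : qD ('0' :: t) = qD t := by
  cases t with
  | nil => rfl
  | cons c t' =>
    cases t' with
    | nil => simp [qD]
    | cons d t'' => exact qD_append ['0'] (c :: d :: t'') (by simp)

lemma master (beach : String) :
    sun_loungers beach
      = sun_loungers_alt beach + (if qD beach.toList then 1 else 0) := by
  rw [A_eq beach, B_eq beach, ← qD_cons_zero beach.toList]
  exact bridge beach.toList.length beach.toList le_rfl '0' 1 (Or.inl ⟨rfl, rfl⟩)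

-- ===== VERDICT (by name: the statement is the Claim_ definition above) =====
theorem sun_loungers_spec : Claim_unchanged_sun_loungers := by
  intro beach _ hD
  rw [master beach]
  have hq : qD beach.toList = false := by
    unfold D_sun_loungers at hD
    simpa using hD
  rw [hq]
  simp

theorem sun_loungers_changed : Claim_changed_sun_loungers := by
  unfold Claim_changed_sun_loungers
  decide

theorem sun_loungers_tight : Claim_exact_sun_loungers := by
  intro beach _ hD
  rw [master beach]
  unfold D_sun_loungers at hD
  rw [hD]
  simp
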